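-- pv_equiv track=rewrite | github.com/Bytestorm5/Buckshot-Roulette-Python | stat_engine.py | possible_actions
-- ===== SOURCE A (Python) =====
-- import itertools
--
-- def possible_actions(action_pool: list):
--     actions = set()
--     actions.add(())
--     for i in range(1, len(action_pool)+1):
--         combs = list(itertools.combinations(action_pool, i))
--         for c in combs:
--             valid = True
--             mg = False
--             for item in c:
--                 if item == 'magnifying_glass':
--                     mg = True
--                 if item == 'beer'and mg:
--                     valid = False
--                     break
--             if valid:
--                 actions.add(tuple(c))
--     return actions
-- ===== SOURCE B (Python) =====
-- def possible_actions(action_pool: list):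
--     # Recursive pruned generation: build only the valid combinations directly,
--     # threading the 'magnifying_glass seen' flag, instead of enumerating every
--     # combination and re-scanning each one for validity.
--     def gen(pool, k, mg):
--         if k == 0:
--             return [()]
--         if not pool:
--             return []
--         x = pool[0]
--         rest = pool[1:]
--         out = []
--         if not (x == 'beer' and mg):
--             for t in gen(rest, k - 1, mg or x == 'magnifying_glass'):
--                 out.append((x,) + t)
--         out.extend(gen(rest, k, mg))
--         return out
--
--     actions = {()}
--     for i in range(1, len(action_pool) + 1):
--         for c in gen(action_pool, i, False):
--             actions.add(c)
--     return actions
-- ===== Notes on version B (the rewrite author's own statement) =====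
-- stated objective: alternative
-- what changed: Replaces itertools.combinations enumeration followed by a per-tuple validity rescan with a recursive choose/skip generator that threads the magnifying_glass flag and prunes invalid (beer-after-magnifying_glass) combinations as it builds them.
import Mathlib
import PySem

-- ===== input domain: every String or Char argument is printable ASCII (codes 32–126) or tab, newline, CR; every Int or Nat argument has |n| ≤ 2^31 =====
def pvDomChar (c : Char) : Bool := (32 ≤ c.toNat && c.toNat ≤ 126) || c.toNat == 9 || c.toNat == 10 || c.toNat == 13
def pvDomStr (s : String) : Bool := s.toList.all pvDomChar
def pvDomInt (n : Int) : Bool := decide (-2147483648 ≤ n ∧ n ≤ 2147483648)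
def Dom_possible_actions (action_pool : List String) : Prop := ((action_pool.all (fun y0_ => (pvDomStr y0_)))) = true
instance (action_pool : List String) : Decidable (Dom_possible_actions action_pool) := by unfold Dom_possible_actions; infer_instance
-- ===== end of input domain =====

-- B replaces A's enumerate-all-combinations-then-rescan-each-for-validity with a
-- recursive generator that builds only the valid combinations, threading the
-- 'magnifying_glass seen' flag (objective: alternative algorithm, prunes early).

-- ===== PORT A =====
-- inner 'for item in c' loop of A, with the early break on an invalid tuple
def pvValidLoop : List String → Bool → Bool
  | [], _ => true
  | item :: rest, mg =>
    let mg := if item == "magnifying_glass" then true else mg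
    if item == "beer" && mg then false else pvValidLoop rest mg

-- itertools.combinations(xs, k) in its lexicographic (index) order
def pvCombs : Nat → List String → List (List String)
  | 0, _ => [[]]
  | _ + 1, [] => []
  | k + 1, x :: xs => (pvCombs k xs).map (fun c => x :: c) ++ pvCombs (k + 1) xs

def possible_actions (action_pool : List String) : List (List String) :=
  let actions : PySem.Set (List String) := PySem.Set.add PySem.Set.empty []
  (PySem.List.pyRange 1 ((action_pool.length : Int) + 1) 1).foldl
    (fun actions i =>
      (pvCombs i.toNat action_pool).foldl
        (fun actions c =>
          if pvValidLoop c false then PySem.Set.add actions c else actions)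
        actions)
    actions

-- ===== PORT B =====
-- gen(pool, k, mg) of Source B: the valid k-combinations of pool given the mg flag
def pvGen : List String → Nat → Bool → List (List String)
  | _, 0, _ => [[]]
  | [], _ + 1, _ => []
  | x :: rest, k + 1, mg =>
    (if !(x == "beer" && mg) then
      (pvGen rest k (mg || x == "magnifying_glass")).map (fun t => x :: t)
    else []) ++ pvGen rest (k + 1) mg

def possible_actions_alt (action_pool : List String) : List (List String) :=
  let actions : PySem.Set (List String) := PySem.Set.ofList [[]]
  (PySem.List.pyRange 1 ((action_pool.length : Int) + 1) 1).foldl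
    (fun actions i =>
      (pvGen action_pool i.toNat false).foldl
        (fun actions c => PySem.Set.add actions c) actions)
    actions

-- ===== PRECONDITION & SPEC =====
def Spec_possible_actions (action_pool : List String) (out : List (List String)) : Prop := out = possible_actions_alt action_pool
instance (action_pool : List String) (out : List (List String)) : Decidable (Spec_possible_actions action_pool out) := by unfold Spec_possible_actions; infer_instance

-- ===== CLAIM (what is proved, stated in full; the proofs are below) =====
def Claim_equal_possible_actions : Prop := ∀ (action_pool : List String), Dom_possible_actions action_pool → Spec_possible_actions action_pool (possible_actions action_pool)

-- ===== LEMMAS AND PROOFS =====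

-- B's pruned generator produces exactly A's valid combinations, in the same order
theorem pvGen_eq_filter (xs : List String) : ∀ (k : Nat) (mg : Bool),
    pvGen xs k mg = (pvCombs k xs).filter (fun c => pvValidLoop c mg) := by
  induction xs with
  | nil =>
    intro k mg
    cases k with
    | zero => simp [pvGen, pvCombs, pvValidLoop]
    | succ k => simp [pvGen, pvCombs]
  | cons x rest ih =>
    intro k mg
    cases k with
    | zero => simp [pvGen, pvCombs, pvValidLoop]
    | succ k =>
      have hbm : ∀ c : List String,
          pvValidLoop (x :: c) mg =
            (if x == "beer" && mg then false
             else pvValidLoop c (mg || x == "magnifying_glass")) := by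
        intro c
        by_cases hb : x = "beer"
        · subst hb
          simp [pvValidLoop]
        · have hb' : (x == "beer") = false := by
            simp [hb]
          simp only [pvValidLoop, hb', Bool.false_and, Bool.false_eq_true, if_false]
          by_cases hm : x = "magnifying_glass"
          · simp [hm]
          · have hm' : (x == "magnifying_glass") = false := by simp [hm]
            simp [hm']
      simp only [pvGen, pvCombs, List.filter_append, List.filter_map]
      rw [ih (k + 1) mg]
      by_cases hcond : (x == "beer" && mg) = true
      · have : ∀ c : List String, pvValidLoop (x :: c) mg = false := by
          intro c; rw [hbm c, if_pos hcond]
        simp only [hcond, Bool.not_true]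
        have hfil : (pvCombs k rest).filter
            ((fun c => pvValidLoop c mg) ∘ fun c => x :: c) = [] := by
          apply List.filter_eq_nil_iff.mpr
          intro c _
          simp [Function.comp, this c]
        rw [hfil]
        simp
      · have hc' : (x == "beer" && mg) = false := by
          cases h : (x == "beer" && mg) <;> simp_all
        have : ((fun c => pvValidLoop c mg) ∘ fun c => x :: c)
            = fun c => pvValidLoop c (mg || x == "magnifying_glass") := by
          funext c
          simp [Function.comp, hbm c, hc']
        rw [this, ← ih k (mg || x == "magnifying_glass")]
        simp [hc']

theorem possible_actions_spec : Claim_equal_possible_actions := by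
  intro action_pool _
  unfold Spec_possible_actions possible_actions possible_actions_alt
  apply PySem.List.foldl_congr_mem
  intro acc i _
  rw [pvGen_eq_filter]
  rw [← PySem.List.foldl_if_eq_foldl_filter]
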